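-- pv_equiv track=rewrite | github.com/mydatastack/google-analytics-to-s3 | functions/partitioning/main.py | group_by_ds
-- ===== SOURCE A (Python) =====
-- from itertools import groupby
--
-- def group_by_ds(data: list) -> list:
--     return [
--             (tid, ds, event, event_type, list(dt for tid, ds, ev, et, dt in data))
--             for tid, g1 in groupby(data, key=lambda x: x[0])
--             for ds, g2 in groupby(g1, key=lambda x: x[1])
--             for event, g3 in groupby(g2, key=lambda x: x[2])
--             for event_type, data in groupby(g3, key=lambda x: x[3])
--             ]
-- ===== SOURCE B (Python) =====
-- def group_by_ds(data: list) -> list: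
--     out = []
--     cur_key = None
--     cur_dts = []
--     for tid, ds, ev, et, dt in data:
--         key = (tid, ds, ev, et)
--         if cur_key == key:
--             cur_dts.append(dt)
--         else:
--             if cur_key is not None:
--                 out.append(cur_key + (cur_dts,))
--             cur_key = key
--             cur_dts = [dt]
--     if cur_key is not None:
--         out.append(cur_key + (cur_dts,))
--     return out
-- ===== Notes on version B (the rewrite author's own statement) =====
-- stated objective: simpler
-- what changed: Replaces the four nested itertools.groupby passes and 4-level comprehension with one explicit forward loop that keeps the current composite key and its dt-accumulator, flushing a row whenever the key changes.
import Mathlib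
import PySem

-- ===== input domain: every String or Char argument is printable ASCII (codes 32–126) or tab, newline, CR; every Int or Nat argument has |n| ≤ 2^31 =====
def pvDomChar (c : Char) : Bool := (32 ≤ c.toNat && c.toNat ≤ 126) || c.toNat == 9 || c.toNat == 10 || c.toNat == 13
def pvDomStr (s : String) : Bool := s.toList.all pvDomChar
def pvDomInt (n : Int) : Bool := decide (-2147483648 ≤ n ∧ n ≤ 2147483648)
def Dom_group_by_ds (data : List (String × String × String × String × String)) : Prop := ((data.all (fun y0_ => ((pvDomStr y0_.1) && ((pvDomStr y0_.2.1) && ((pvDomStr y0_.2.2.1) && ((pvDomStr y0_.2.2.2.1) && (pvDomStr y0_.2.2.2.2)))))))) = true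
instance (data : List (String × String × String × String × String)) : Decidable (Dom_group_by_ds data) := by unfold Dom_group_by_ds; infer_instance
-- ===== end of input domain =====

-- B replaces the four nested itertools.groupby passes with one explicit forward loop over the
-- rows that accumulates the current composite key and its dt list (objective: simpler).

-- ===== PORT A =====
-- itertools.groupby over a (fully materialised) list: consecutive runs of equal keys,
-- the recorded key being the key of the run's first element (exact for list input).
def pvGB {α κ : Type} [BEq κ] (k : α → κ) : List α → List (κ × List α)
  | [] => []
  | x :: xs =>
      (k x, x :: xs.takeWhile (fun y => k y == k x)) :: pvGB k (xs.dropWhile (fun y => k y == k x))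
termination_by l => l.length
decreasing_by
  simpa using Nat.lt_succ_of_le (List.length_dropWhile_le (fun y => k y == k x) xs)

def group_by_ds (data : List (String × String × String × String × String)) : List (String × String × String × String × List String) :=
  (pvGB (fun x => x.1) data).flatMap (fun ag =>
    (pvGB (fun x => x.2.1) ag.2).flatMap (fun bh =>
      (pvGB (fun x => x.2.2.1) bh.2).flatMap (fun ci =>
        (pvGB (fun x => x.2.2.2.1) ci.2).map (fun dj =>
          (ag.1, bh.1, ci.1, dj.1, dj.2.map (fun y => y.2.2.2.2))))))

-- ===== PORT B =====
-- the loop of Source B: cur = current (composite key, dts) or none; out = rows emitted so far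
def pvAltGo (rows : List (String × String × String × String × String))
    (cur : Option ((String × String × String × String) × List String))
    (out : List (String × String × String × String × List String)) :
    List (String × String × String × String × List String) :=
  match rows with
  | [] =>
      match cur with
      | none => out
      | some c => out ++ [(c.1.1, c.1.2.1, c.1.2.2.1, c.1.2.2.2, c.2)]
  | r :: rest =>
      let key := (r.1, r.2.1, r.2.2.1, r.2.2.2.1)
      match cur with
      | some c =>
          if c.1 == key then pvAltGo rest (some (c.1, c.2 ++ [r.2.2.2.2])) out
          else pvAltGo rest (some (key, [r.2.2.2.2]))
                 (out ++ [(c.1.1, c.1.2.1, c.1.2.2.1, c.1.2.2.2, c.2)])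
      | none => pvAltGo rest (some (key, [r.2.2.2.2])) out

def group_by_ds_alt (data : List (String × String × String × String × String)) : List (String × String × String × String × List String) :=
  pvAltGo data none []

-- ===== PRECONDITION & SPEC =====
def Spec_group_by_ds (data : List (String × String × String × String × String)) (out : List (String × String × String × String × List String)) : Prop := out = group_by_ds_alt data
instance (data : List (String × String × String × String × String)) (out : List (String × String × String × String × List String)) : Decidable (Spec_group_by_ds data out) := by unfold Spec_group_by_ds; infer_instance

-- ===== CLAIM (what is proved, stated in full; the proofs are below) =====
def Claim_equal_group_by_ds : Prop := ∀ (data : List (String × String × String × String × String)), Dom_group_by_ds data → Spec_group_by_ds data (group_by_ds data)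

-- ===== LEMMAS AND PROOFS =====

-- the nested composite key A effectively groups by, and the canonical composite grouping
def pvKN (x : String × String × String × String × String) : ((String × String) × String) × String :=
  (((x.1, x.2.1), x.2.2.1), x.2.2.2.1)

def pvC (l : List (String × String × String × String × String)) : List (String × String × String × String × List String) :=
  (pvGB pvKN l).flatMap (fun ch =>
    [(ch.1.1.1.1, ch.1.1.1.2, ch.1.1.2, ch.1.2, ch.2.map (fun y => y.2.2.2.2))])

theorem pvGB_nil {α κ : Type} [BEq κ] (k : α → κ) : pvGB k [] = [] := by
  simp [pvGB]

theorem pvGB_cons {α κ : Type} [BEq κ] (k : α → κ) (x : α) (xs : List α) :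
    pvGB k (x :: xs) = (k x, x :: xs.takeWhile (fun y => k y == k x)) ::
      pvGB k (xs.dropWhile (fun y => k y == k x)) := by
  simp [pvGB]

theorem pv_prod_beq {α β : Type} [BEq α] [BEq β] (a c : α) (b d : β) :
    (((a, b) == (c, d)) : Bool) = (a == c && b == d) := rfl

theorem pv_takeWhile_congr {α : Type} (p q : α → Bool) (l : List α)
    (h : ∀ a ∈ l, p a = q a) : l.takeWhile p = l.takeWhile q := by
  induction l with
  | nil => rfl
  | cons x xs ih =>
      have hx := h x (by simp)
      by_cases hp : p x = true
      · simp [List.takeWhile_cons, hp, hx ▸ hp, ih (fun a ha => h a (by simp [ha]))]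
      · simp [List.takeWhile_cons, hp, hx ▸ hp]

theorem pv_dropWhile_congr {α : Type} (p q : α → Bool) (l : List α)
    (h : ∀ a ∈ l, p a = q a) : l.dropWhile p = l.dropWhile q := by
  induction l with
  | nil => rfl
  | cons x xs ih =>
      have hx := h x (by simp)
      by_cases hp : p x = true
      · simp [List.dropWhile_cons, hp, hx ▸ hp, ih (fun a ha => h a (by simp [ha]))]
      · simp [List.dropWhile_cons, hp, hx ▸ hp]

-- dropWhile by the stronger predicate splits along takeWhile/dropWhile of the weaker one
theorem pv_dropWhile_split {α : Type} (p q : α → Bool) (l : List α)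
    (h : ∀ a, q a = true → p a = true) :
    l.dropWhile q = (l.takeWhile p).dropWhile q ++ l.dropWhile p := by
  induction l with
  | nil => rfl
  | cons x xs ih =>
      by_cases hq : q x = true
      · have hp := h x hq
        simp [List.dropWhile_cons, List.takeWhile_cons, hq, hp, ih]
      · by_cases hp : p x = true
        · simp [List.dropWhile_cons, List.takeWhile_cons, hq, hp,
            List.takeWhile_append_dropWhile]
        · simp [List.dropWhile_cons, List.takeWhile_cons, hq, hp]

-- pvGB distributes over ++ when no run can cross the boundary
theorem pvGB_append {α κ : Type} [BEq κ] [LawfulBEq κ] (k : α → κ) (l₁ l₂ : List α)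
    (h : ∀ y ∈ l₁, ∀ z, l₂.head? = some z → ¬ k y = k z) :
    pvGB k (l₁ ++ l₂) = pvGB k l₁ ++ pvGB k l₂ := by
  cases l₂ with
  | nil => simp [pvGB_nil]
  | cons z zs =>
    induction hn : l₁.length using Nat.strong_induction_on generalizing l₁ with
    | _ n ih =>
      cases l₁ with
      | nil => simp [pvGB_nil]
      | cons x xs =>
        have hzx : ((fun y => k y == k x) z) = false := by
          have := h x (by simp) z (by simp)
          simp only [beq_eq_false_iff_ne, ne_eq]
          exact fun e => this e.symm
        have htw : (xs ++ z :: zs).takeWhile (fun y => k y == k x) =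
            xs.takeWhile (fun y => k y == k x) := by
          rw [List.takeWhile_append]
          split
          next hlen =>
            rw [List.takeWhile_cons_of_neg (by simpa using hzx)]
            rw [(List.takeWhile_prefix _).eq_of_length hlen]
            simp
          next => rfl
        have hdw : (xs ++ z :: zs).dropWhile (fun y => k y == k x) =
            xs.dropWhile (fun y => k y == k x) ++ z :: zs := by
          rw [List.dropWhile_append]
          split
          next hemp =>
            rw [List.isEmpty_iff] at hemp
            rw [hemp, List.dropWhile_cons_of_neg (by simpa using hzx)]
            simp
          next => rfl
        rw [List.cons_append, pvGB_cons, pvGB_cons, htw, hdw]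
        rw [ih (xs.dropWhile (fun y => k y == k x)).length
            (by subst hn; simp only [List.length_cons]; exact Nat.lt_succ_of_le (List.length_dropWhile_le (fun y => k y == k x) xs))
            _ (fun y hy w hw => h y (by
                right; exact (List.dropWhile_sublist _).mem hy) w hw) rfl]
        simp

-- on a list where k is constantly c, grouping by the paired key is grouping by k'
theorem pvGB_const {α κ κ' : Type} [BEq κ] [LawfulBEq κ] [BEq κ'] (k : α → κ) (k' : α → κ')
    (c : κ) (l : List α) (h : ∀ y ∈ l, k y = c) :
    pvGB (fun x => (k x, k' x)) l = (pvGB k' l).map (fun bh => ((c, bh.1), bh.2)) := by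
  induction hn : l.length using Nat.strong_induction_on generalizing l with
  | _ n ih =>
    cases l with
    | nil => simp [pvGB_nil]
    | cons x xs =>
      have hx : k x = c := h x (by simp)
      have hpred : ∀ y ∈ xs, ((k y, k' y) == (k x, k' x) : Bool) = (k' y == k' x) := by
        intro y hy
        have : k y = k x := (h y (by simp [hy])).trans hx.symm
        simp [pv_prod_beq, this]
      rw [pvGB_cons, pvGB_cons]
      rw [pv_takeWhile_congr _ _ _ hpred, pv_dropWhile_congr _ _ _ hpred]
      rw [ih (xs.dropWhile (fun y => k' y == k' x)).length
          (by subst hn; simp only [List.length_cons]; exact Nat.lt_succ_of_le (List.length_dropWhile_le (fun y => k' y == k' x) xs))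
          _ (fun y hy => h y (by
              right; exact (List.dropWhile_sublist _).mem hy)) rfl]
      simp [hx]

-- KEY LEMMA: two nested consecutive groupbys equal one groupby on the paired key
theorem pvGB_pair {α κ κ' β : Type} [BEq κ] [LawfulBEq κ] [BEq κ'] [LawfulBEq κ']
    (k : α → κ) (k' : α → κ') (F : κ → κ' → List α → List β) (l : List α) :
    (pvGB k l).flatMap (fun ag => (pvGB k' ag.2).flatMap (fun bh => F ag.1 bh.1 bh.2))
      = (pvGB (fun x => (k x, k' x)) l).flatMap (fun ch => F ch.1.1 ch.1.2 ch.2) := by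
  induction hn : l.length using Nat.strong_induction_on generalizing l with
  | _ n ih =>
    cases l with
    | nil => simp [pvGB_nil]
    | cons x xs =>
      -- abbreviations
      set p : α → Bool := fun y => k y == k x with hp
      set q : α → Bool := fun y => (k y, k' y) == (k x, k' x) with hq
      have hqp : ∀ a, q a = true → p a = true := by
        intro a ha
        simp [hq, pv_prod_beq, Bool.and_eq_true] at ha
        simp [hp, ha.1]
      have hqtw : xs.takeWhile q =
          (xs.takeWhile p).takeWhile (fun y => k' y == k' x) := by
        rw [List.takeWhile_takeWhile]
        apply pv_takeWhile_congr
        intro a _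
        simp [hq, hp, pv_prod_beq, Bool.and_comm]
      have hqdw : xs.dropWhile q =
          (xs.takeWhile p).dropWhile (fun y => k' y == k' x) ++ xs.dropWhile p := by
        rw [pv_dropWhile_split p q xs hqp]
        congr 1
        apply pv_dropWhile_congr
        intro a ha
        have hpa : p a = true := List.mem_takeWhile_imp ha
        simp [hp] at hpa
        simp [hq, pv_prod_beq, hpa]
      rw [pvGB_cons k x xs, pvGB_cons (fun x => (k x, k' x)) x xs]
      simp only [List.flatMap_cons]
      rw [pvGB_cons k' x (xs.takeWhile p)]
      simp only [List.flatMap_cons]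
      -- first groups agree
      rw [← hp, ← hq, hqtw]
      -- leftover of the inner grouping inside the first outer group
      have hconst : ∀ y ∈ (xs.takeWhile p).dropWhile (fun y => k' y == k' x), k y = k x := by
        intro y hy
        have : y ∈ xs.takeWhile p := (List.dropWhile_sublist _).mem hy
        have := List.mem_takeWhile_imp this
        simpa [hp] using this
      have hbound : ∀ y ∈ (xs.takeWhile p).dropWhile (fun y => k' y == k' x),
          ∀ z, (xs.dropWhile p).head? = some z → ¬ (k y, k' y) = (k z, k' z) := by
        intro y hy z hz heq
        have hky : k y = k x := hconst y hy
        have hkz : p z = false := by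
          have hh := List.head?_dropWhile_not p xs
          rw [hz] at hh
          exact hh
        have : ¬ k z = k x := by simpa [hp] using hkz
        have h1 : k y = k z := congrArg Prod.fst heq
        exact this (h1.symm.trans hky)
      rw [hqdw, pvGB_append _ _ _ hbound,
          pvGB_const k k' (k x) _ hconst]
      rw [List.flatMap_append]
      rw [ih (xs.dropWhile p).length
          (by subst hn; simp only [List.length_cons]; exact Nat.lt_succ_of_le (List.length_dropWhile_le p xs)) _ rfl]
      simp [List.flatMap_map]

-- A equals the canonical composite grouping
theorem pvA_eq_C (data : List (String × String × String × String × String)) :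
    group_by_ds data = pvC data := by
  unfold group_by_ds pvC
  have h1 := pvGB_pair (fun x : String × String × String × String × String => x.1)
    (fun x => x.2.1)
    (fun a b g => (pvGB (fun x => x.2.2.1) g).flatMap (fun ci =>
      (pvGB (fun x => x.2.2.2.1) ci.2).map (fun dj =>
        (a, b, ci.1, dj.1, dj.2.map (fun y => y.2.2.2.2))))) data
  rw [h1]
  have h2 := pvGB_pair (fun x : String × String × String × String × String => (x.1, x.2.1))
    (fun x => x.2.2.1)
    (fun ab c g => (pvGB (fun x => x.2.2.2.1) g).map (fun dj =>
      (ab.1, ab.2, c, dj.1, dj.2.map (fun y => y.2.2.2.2)))) data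
  rw [h2]
  have h3 := pvGB_pair
    (fun x : String × String × String × String × String => ((x.1, x.2.1), x.2.2.1))
    (fun x => x.2.2.2.1)
    (fun abc d g => [(abc.1.1, abc.1.2, abc.2, d, g.map (fun y => y.2.2.2.2))]) data
  have hmap : ∀ (g : List (String × String × String × String × String)) (a b c : String),
      (pvGB (fun x => x.2.2.2.1) g).map (fun dj =>
        (a, b, c, dj.1, dj.2.map (fun y => y.2.2.2.2)))
      = (pvGB (fun x => x.2.2.2.1) g).flatMap (fun dj =>
        [(a, b, c, dj.1, dj.2.map (fun y => y.2.2.2.2))]) := by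
    intro g a b c
    rw [List.map_eq_flatMap]
  simp only [hmap]
  rw [h3]
  rfl

-- B's loop invariant
theorem pvAltGo_some (rows : List (String × String × String × String × String))
    (key : String × String × String × String) (dts : List String)
    (out : List (String × String × String × String × List String)) :
    pvAltGo rows (some (key, dts)) out
      = out ++ [(key.1, key.2.1, key.2.2.1, key.2.2.2,
          dts ++ (rows.takeWhile (fun y => ((y.1, y.2.1, y.2.2.1, y.2.2.2.1) : String × String × String × String) == key)).map (fun y => y.2.2.2.2))]
        ++ pvC (rows.dropWhile (fun y => ((y.1, y.2.1, y.2.2.1, y.2.2.2.1) : String × String × String × String) == key)) := by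
  induction hn : rows.length using Nat.strong_induction_on generalizing rows key dts out with
  | _ n ih =>
    cases rows with
    | nil => simp [pvAltGo, pvC, pvGB_nil]
    | cons r rest =>
      by_cases hk : ((r.1, r.2.1, r.2.2.1, r.2.2.2.1) : String × String × String × String) = key
      · have hbeq : (key == ((r.1, r.2.1, r.2.2.1, r.2.2.2.1) : String × String × String × String)) = true := by
          simp [hk]
        simp only [pvAltGo, hbeq]
        rw [ih rest.length (by subst hn; simp) rest key (dts ++ [r.2.2.2.2]) out rfl]
        simp [hk]
      · have hbeq : (key == ((r.1, r.2.1, r.2.2.1, r.2.2.2.1) : String × String × String × String)) = false := by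
          simp [beq_eq_false_iff_ne]
          exact fun h => hk h.symm
        simp only [pvAltGo, hbeq]
        rw [if_neg (by simp_all)]
        rw [ih rest.length (by subst hn; simp) rest (r.1, r.2.1, r.2.2.1, r.2.2.2.1)
            [r.2.2.2.2] (out ++ [(key.1, key.2.1, key.2.2.1, key.2.2.2, dts)]) rfl]
        have hkb : ((r.1, r.2.1, r.2.2.1, r.2.2.2.1) == key : Bool) = false := by
          simp [beq_eq_false_iff_ne, hk]
        have hpred : ∀ y : String × String × String × String × String,
            ((pvKN y == pvKN r : Bool))
              = (((y.1, y.2.1, y.2.2.1, y.2.2.2.1) : String × String × String × String) == (r.1, r.2.1, r.2.2.1, r.2.2.2.1)) := by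
          intro y
          simp [pvKN, Prod.ext_iff]
          tauto
        have hC : pvC (r :: rest)
            = [(r.1, r.2.1, r.2.2.1, r.2.2.2.1,
                r.2.2.2.2 :: (rest.takeWhile (fun y => ((y.1, y.2.1, y.2.2.1, y.2.2.2.1) : String × String × String × String) == (r.1, r.2.1, r.2.2.1, r.2.2.2.1))).map (fun y => y.2.2.2.2))]
              ++ pvC (rest.dropWhile (fun y => ((y.1, y.2.1, y.2.2.1, y.2.2.2.1) : String × String × String × String) == (r.1, r.2.1, r.2.2.1, r.2.2.2.1))) := by
          unfold pvC
          rw [pvGB_cons]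
          rw [pv_takeWhile_congr _ _ _ (fun a _ => hpred a),
              pv_dropWhile_congr _ _ _ (fun a _ => hpred a)]
          simp [pvKN]
        rw [List.takeWhile_cons, List.dropWhile_cons]
        simp only [hkb, Bool.false_eq_true, if_false]
        rw [hC]
        simp

theorem pvAltGo_none (rows : List (String × String × String × String × String))
    (out : List (String × String × String × String × List String)) :
    pvAltGo rows none out = out ++ pvC rows := by
  cases rows with
  | nil => simp [pvAltGo, pvC, pvGB_nil]
  | cons r rest =>
    simp only [pvAltGo]
    rw [pvAltGo_some rest (r.1, r.2.1, r.2.2.1, r.2.2.2.1) [r.2.2.2.2] out]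
    have hpred : ∀ y : String × String × String × String × String,
        ((pvKN y == pvKN r : Bool))
          = (((y.1, y.2.1, y.2.2.1, y.2.2.2.1) : String × String × String × String) == (r.1, r.2.1, r.2.2.1, r.2.2.2.1)) := by
      intro y
      simp [pvKN, Prod.ext_iff]
      tauto
    conv_rhs => unfold pvC
    rw [pvGB_cons]
    rw [pv_takeWhile_congr _ _ _ (fun a _ => hpred a),
        pv_dropWhile_congr _ _ _ (fun a _ => hpred a)]
    simp [pvKN, pvC]

-- ===== VERDICT (by name: the statement is the Claim_ definition above) =====
theorem group_by_ds_spec : Claim_equal_group_by_ds := by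
  intro data _
  unfold Spec_group_by_ds group_by_ds_alt
  rw [pvA_eq_C, pvAltGo_none]
  simp
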